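-- pv_equiv track=rewrite | github.com/NhutTien0905/itr-training-ecg-qrs_detection | flask/dataloader_v2.py | find_middle_indices
-- ===== SOURCE A (Python) =====
-- def find_middle_indices(data, column_index, value):
--     # Initialize variables
--     middle_indices = []
--     current_block = []
--
--     # Iterate through the data to find blocks of the specified value
--     for index, row in enumerate(data):
--         if row[column_index] == value:
--             current_block.append(index)
--         else:
--             if current_block:  # If the block is not empty, process it
--                 middle_index = len(current_block) // 2
--                 middle_indices.append(current_block[middle_index])
--                 current_block = []  # Reset for the next block
--
--     # Process the last block if it exists
--     if current_block:
--         middle_index = len(current_block) // 2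
--         middle_indices.append(current_block[middle_index])
--
--     return middle_indices
-- ===== SOURCE B (Python) =====
-- def find_middle_indices(data, column_index, value):
--     # One pass to mark matching rows, then an index-based scan over whole runs:
--     # for each maximal run of True starting at i and ending before j, the middle
--     # original index is i + (j - i) // 2.
--     flags = [row[column_index] == value for row in data]
--     middle_indices = []
--     n = len(flags)
--     i = 0
--     while i < n:
--         if flags[i]:
--             j = i + 1
--             while j < n and flags[j]:
--                 j += 1
--             middle_indices.append(i + (j - i) // 2)
--             i = j
--         else:
--             i += 1
--     return middle_indices
-- ===== Notes on version B (the rewrite author's own statement) =====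
-- stated objective: alternative
-- what changed: Replaces A's per-element accumulator list of block indices (with a trailing flush) by a precomputed boolean mask scanned run-by-run with index arithmetic: each run's middle index is computed as start + length//2 instead of indexing into a stored block.
import Mathlib
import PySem

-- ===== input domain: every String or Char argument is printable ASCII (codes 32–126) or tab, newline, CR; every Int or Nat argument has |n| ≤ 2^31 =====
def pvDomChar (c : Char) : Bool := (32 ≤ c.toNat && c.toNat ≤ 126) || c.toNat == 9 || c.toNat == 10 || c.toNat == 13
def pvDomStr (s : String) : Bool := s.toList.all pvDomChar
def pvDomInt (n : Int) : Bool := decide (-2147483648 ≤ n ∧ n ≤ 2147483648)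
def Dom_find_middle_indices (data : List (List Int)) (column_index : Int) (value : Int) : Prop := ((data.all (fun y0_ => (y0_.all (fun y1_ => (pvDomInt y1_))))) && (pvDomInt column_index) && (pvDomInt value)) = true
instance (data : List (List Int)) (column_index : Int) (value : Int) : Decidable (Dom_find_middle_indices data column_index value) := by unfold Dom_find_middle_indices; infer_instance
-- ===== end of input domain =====

-- B scans a precomputed boolean mask run-by-run with index arithmetic instead of
-- A's per-element block accumulator; same O(n) cost, alternative structure.

-- ===== PORT A =====
-- middle_indices.append(current_block[len(current_block) // 2])
def pvFlushA (cur : List Int) : Int :=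
  (PySem.List.pyGet? cur (PySem.Int.floordiv (cur.length : Int) 2)).getD 0

-- the body of A's for-loop: state = (middle_indices, current_block)
def pvStepA (column_index value : Int) (s : List Int × List Int) (p : Int × List Int) :
    List Int × List Int :=
  if (PySem.List.pyGet? p.2 column_index).getD 0 = value then (s.1, s.2 ++ [p.1])
  else if s.2 ≠ [] then (s.1 ++ [pvFlushA s.2], []) else s

def find_middle_indices (data : List (List Int)) (column_index : Int) (value : Int) : List Int :=
  let st := (PySem.List.enumerate data 0).foldl (pvStepA column_index value) ([], [])
  if st.2 ≠ [] then st.1 ++ [pvFlushA st.2] else st.1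

-- ===== PORT B =====
-- Source B's outer while-loop over flags: at a True at index i, the inner while
-- advances j over the run (j - i - 1 = leading Trues of the rest), then
-- appends i + (j - i) // 2 and resumes at j.
def pvScanB : List Bool → Nat → List Int
  | [], _ => []
  | false :: rest, i => pvScanB rest (i + 1)
  | true :: rest, i =>
      let r := (rest.takeWhile (fun b => b)).length
      ((i + (1 + r) / 2 : Nat) : Int) :: pvScanB (rest.dropWhile (fun b => b)) (i + 1 + r)
termination_by l _ => l.length
decreasing_by
  · simp
  · simpa using Nat.lt_succ_of_le (List.length_dropWhile_le _ _)

def find_middle_indices_alt (data : List (List Int)) (column_index : Int) (value : Int) : List Int :=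
  let flags := data.map (fun row => decide ((PySem.List.pyGet? row column_index).getD 0 = value))
  pvScanB flags 0

-- ===== PRECONDITION & SPEC =====
-- Pre_ excludes exactly the inputs where Python A raises IndexError:
-- some row of data does not admit column_index as a (possibly negative) index.
def Pre_find_middle_indices (data : List (List Int)) (column_index : Int) (value : Int) : Prop :=
  ∀ row ∈ data, PySem.Raise.InRange row.length column_index
instance (data : List (List Int)) (column_index : Int) (value : Int) : Decidable (Pre_find_middle_indices data column_index value) := by unfold Pre_find_middle_indices; infer_instance
def pvWitness_find_middle_indices : List (List Int) × Int × Int := ([[1], [2], [1], [1]], 0, 1)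

def Spec_find_middle_indices (data : List (List Int)) (column_index : Int) (value : Int) (out : List Int) : Prop := out = find_middle_indices_alt data column_index value
instance (data : List (List Int)) (column_index : Int) (value : Int) (out : List Int) : Decidable (Spec_find_middle_indices data column_index value out) := by unfold Spec_find_middle_indices; infer_instance

-- ===== CLAIM (what is proved, stated in full; the proofs are below) =====
def Claim_equal_find_middle_indices : Prop := ∀ (data : List (List Int)) (column_index : Int) (value : Int), Dom_find_middle_indices data column_index value → Pre_find_middle_indices data column_index value → Spec_find_middle_indices data column_index value (find_middle_indices data column_index value)

-- ===== LEMMAS AND PROOFS =====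

-- the index list A keeps as current_block during a run: [k, k+1, …, k+m-1]
def pvIdx (k m : Nat) : List Int := (List.range' k m).map (fun j : Nat => (j : Int))

theorem pvIdx_zero (k : Nat) : pvIdx k 0 = [] := rfl

theorem pvIdx_length (k m : Nat) : (pvIdx k m).length = m := by
  unfold pvIdx; rw [List.length_map, List.length_range']

theorem pvIdx_ne_nil (k m : Nat) (hm : m ≠ 0) : pvIdx k m ≠ [] := by
  intro hc
  have := congrArg List.length hc
  rw [pvIdx_length] at this
  simp at this
  exact hm this

theorem pvIdx_concat (k m : Nat) : pvIdx k m ++ [((k + m : Nat) : Int)] = pvIdx k (m + 1) := by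
  unfold pvIdx
  rw [List.range'_1_concat, List.map_append]
  rfl

theorem pvFlush_idx (k m : Nat) (hm : 1 ≤ m) :
    pvFlushA (pvIdx k m) = ((k + m / 2 : Nat) : Int) := by
  have hlt : m / 2 < m := Nat.div_lt_self hm (by omega)
  have hdiv : PySem.Int.floordiv (((pvIdx k m).length : Nat) : Int) 2 = ((m / 2 : Nat) : Int) := by
    rw [pvIdx_length]
    exact_mod_cast PySem.Int.floordiv_natCast m 2
  have hget : PySem.List.pyGet? (pvIdx k m) (((m / 2 : Nat) : Int)) = some ((k + m / 2 : Nat) : Int) := by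
    rw [PySem.List.pyGet?_natCast]
    have hl : m / 2 < (pvIdx k m).length := by rw [pvIdx_length]; exact hlt
    rw [List.getElem?_eq_getElem hl]
    unfold pvIdx
    rw [List.getElem_map]
    rw [List.getElem_range'_1]
  unfold pvFlushA
  rw [hdiv, hget]
  rfl

-- A's trailing flush
def pvPost (s : List Int × List Int) : List Int :=
  if s.2 ≠ [] then s.1 ++ [pvFlushA s.2] else s.1

-- Reference function: pvH flags k m = the output A still produces, given that the
-- current block is the m indices k, k+1, …, k+m-1 and flags describes the rest.
def pvH : List Bool → Nat → Nat → List Int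
  | [], k, m => if m = 0 then [] else [((k + m / 2 : Nat) : Int)]
  | true :: t, k, m => pvH t k (m + 1)
  | false :: t, k, m => (if m = 0 then [] else [((k + m / 2 : Nat) : Int)]) ++ pvH t (k + m + 1) 0

theorem pv_main (column_index value : Int) :
    ∀ (data : List (List Int)) (k m : Nat) (mids : List Int),
    pvPost ((PySem.List.enumerate data (((k + m : Nat) : Int))).foldl (pvStepA column_index value)
        (mids, pvIdx k m)) =
      mids ++ pvH (data.map (fun row => decide ((PySem.List.pyGet? row column_index).getD 0 = value))) k m := by
  intro data
  induction data with
  | nil =>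
      intro k m mids
      rw [PySem.List.enumerate_nil, List.foldl_nil]
      by_cases hm : m = 0
      · subst hm
        simp [pvPost, pvIdx_zero, pvH]
      · unfold pvPost
        rw [if_pos (by exact pvIdx_ne_nil k m hm), pvFlush_idx k m (Nat.one_le_iff_ne_zero.mpr hm)]
        simp [pvH, hm]
  | cons row t ih =>
      intro k m mids
      rw [PySem.List.enumerate_cons, List.foldl_cons]
      by_cases hp : (PySem.List.pyGet? row column_index).getD 0 = value
      · have hstep : pvStepA column_index value (mids, pvIdx k m) (((k + m : Nat) : Int), row)
            = (mids, pvIdx k (m + 1)) := by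
          unfold pvStepA
          rw [if_pos hp]
          simp only
          rw [pvIdx_concat]
        have hs : (((k + m : Nat) : Int)) + 1 = ((k + (m + 1) : Nat) : Int) := by push_cast; ring
        rw [hstep, hs, ih k (m + 1) mids]
        simp [pvH, hp]
      · by_cases hm : m = 0
        · subst hm
          have hstep : pvStepA column_index value (mids, pvIdx k 0) (((k + 0 : Nat) : Int), row)
              = (mids, pvIdx (k + 1) 0) := by
            unfold pvStepA
            rw [if_neg hp, pvIdx_zero, if_neg (by simp)]
            rw [pvIdx_zero]
          have hs : (((k + 0 : Nat) : Int)) + 1 = (((k + 1) + 0 : Nat) : Int) := by push_cast; ring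
          rw [hstep, hs, ih (k + 1) 0 mids]
          simp [pvH, hp]
        · have hstep : pvStepA column_index value (mids, pvIdx k m) (((k + m : Nat) : Int), row)
              = (mids ++ [((k + m / 2 : Nat) : Int)], pvIdx (k + m + 1) 0) := by
            unfold pvStepA
            rw [if_neg hp, if_pos (pvIdx_ne_nil k m hm),
              pvFlush_idx k m (Nat.one_le_iff_ne_zero.mpr hm), pvIdx_zero]
          have hs : (((k + m : Nat) : Int)) + 1 = (((k + m + 1) + 0 : Nat) : Int) := by push_cast; ring
          rw [hstep, hs, ih (k + m + 1) 0 (mids ++ [((k + m / 2 : Nat) : Int)])]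
          simp [pvH, hp, hm]

theorem pv_H_scan : ∀ (flags : List Bool),
    (∀ k m, 1 ≤ m → pvH flags k m =
      ((k + (m + (flags.takeWhile (fun b => b)).length) / 2 : Nat) : Int)
        :: pvScanB (flags.dropWhile (fun b => b)) (k + m + (flags.takeWhile (fun b => b)).length))
    ∧ (∀ k, pvH flags k 0 = pvScanB flags k) := by
  intro flags
  induction flags with
  | nil =>
      refine ⟨?_, ?_⟩
      · intro k m hm
        simp [pvH, pvScanB, Nat.one_le_iff_ne_zero.mp hm]
      · intro k; simp [pvH, pvScanB]
  | cons f t ih =>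
      cases f with
      | true =>
          have ht : List.takeWhile (fun b => b) (true :: t) = true :: List.takeWhile (fun b => b) t := by simp
          have hd : List.dropWhile (fun b => b) (true :: t) = List.dropWhile (fun b => b) t := by simp
          refine ⟨?_, ?_⟩
          · intro k m hm
            rw [pvH, ih.1 k (m + 1) (by omega), ht, hd, List.length_cons]
            congr 1
            · congr 1; omega
            · congr 1; omega
          · intro k
            rw [pvH, ih.1 k 1 (le_refl 1), pvScanB]
      | false =>
          refine ⟨?_, ?_⟩
          · intro k m hm
            rw [pvH, ih.2 (k + m + 1)]
            have ht : List.takeWhile (fun b => b) (false :: t) = [] := by simp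
            have hd : List.dropWhile (fun b => b) (false :: t) = false :: t := by simp
            rw [ht, hd]
            rw [pvScanB]
            simp [Nat.one_le_iff_ne_zero.mp hm]
          · intro k
            rw [pvH, ih.2 (k + 1), pvScanB]
            simp

-- ===== VERDICT (by name: the statement is the Claim_ definition above) =====
theorem find_middle_indices_spec : Claim_equal_find_middle_indices := by
  intro data column_index value _ _
  unfold Spec_find_middle_indices find_middle_indices find_middle_indices_alt
  have h := pv_main column_index value data 0 0 []
  rw [(pv_H_scan _).2 0] at h
  simpa [pvPost, pvIdx_zero] using h
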